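-- pv_equiv track=rewrite | github.com/patwadeepak/data-structures-and-algorithms | codeforces/contests-participated/Codeforces Round 1052 (Div. 2)/A.py | solve
-- ===== SOURCE A (Python) =====
-- from collections import Counter
--
-- def solve(a, n):
--     c = Counter(a)
--
--     maxx = float('-inf')
--     for key in c.keys():
--         maxx = max(maxx, c[key])
--
--     min_removal = float('inf')
--     for m in range(maxx, 0, -1):
--         removal = 0
--         for key in c.keys():
--             if m > c[key]:
--                 removal += c[key]
--             elif m < c[key]:
--                 removal += c[key] - m
--         min_removal = min(min_removal, removal)
--
--     return n-min_removal
-- ===== SOURCE B (Python) =====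
-- from collections import Counter
--
-- def solve(a, n):
--     counts = list(Counter(a).values())
--     best = max(v * sum(1 for w in counts if w >= v) for v in set(counts))
--     return n - len(a) + best
-- ===== Notes on version B (the rewrite author's own statement) =====
-- stated objective: faster
-- what changed: A scans every threshold m from max(count) down to 1 and recomputes the removal cost with an inner loop over all keys; B notes removal(m) = len(a) - m*#{counts >= m}, that the optimum is attained at one of the distinct count values, and takes a single max over set(counts), each candidate scored by one counting pass over the counts list.
import Mathlib
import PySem

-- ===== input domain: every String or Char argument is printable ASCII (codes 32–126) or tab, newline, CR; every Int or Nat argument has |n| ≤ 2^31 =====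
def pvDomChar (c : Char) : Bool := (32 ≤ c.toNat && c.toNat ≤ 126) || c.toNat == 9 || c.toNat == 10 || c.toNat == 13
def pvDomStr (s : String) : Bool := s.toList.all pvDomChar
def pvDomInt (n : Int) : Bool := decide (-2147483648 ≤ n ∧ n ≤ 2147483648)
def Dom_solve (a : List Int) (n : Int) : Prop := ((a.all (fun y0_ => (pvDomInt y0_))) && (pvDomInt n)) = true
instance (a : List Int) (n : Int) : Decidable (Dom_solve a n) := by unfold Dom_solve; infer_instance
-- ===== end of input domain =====

-- B scans all m in 1..max(counts) in A replaced by evaluating removal only at the distinct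
-- count values (removal(m) = len(a) - m·#{counts ≥ m}, optimal at a count value); objective: faster.

-- ===== PORT A =====
-- literal port of Source A: Counter, running max over keys, then for m in range(maxx, 0, -1)
-- an inner loop over keys accumulating the removal, running min over m.
def solve (a : List Int) (n : Int) : Int :=
  let c := PySem.Dict.counter a
  -- maxx = float('-inf'); for key in c.keys(): maxx = max(maxx, c[key])   (none = -inf)
  let maxx : Option Int := c.keys.foldl (fun mx k =>
    match mx with
    | none => some (c.getD k 0)
    | some m => some (max m (c.getD k 0))) none
  match maxx with
  | none => 0  -- a = []: Python raises TypeError at range(float('-inf'), 0, -1); excluded by Pre_solve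
  | some mx =>
    -- min_removal = float('inf'); for m in range(maxx, 0, -1): …   (none = inf)
    let minr : Option Int := (PySem.List.pyRange mx 0 (-1)).foldl (fun mn m =>
      let removal := c.keys.foldl (fun r k =>
        if m > c.getD k 0 then r + c.getD k 0
        else if m < c.getD k 0 then r + (c.getD k 0 - m)
        else r) 0
      match mn with
      | none => some removal
      | some mn' => some (min mn' removal)) none
    match minr with
    | none => 0  -- unreachable for a ≠ [] (maxx ≥ 1 then); Python would return the float n - inf
    | some r => n - r

-- ===== PORT B =====
-- literal port of Source B: counts = list(Counter(a).values());
-- best = max(v * sum(1 for w in counts if w >= v) for v in set(counts)); return n - len(a) + best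
def solve_alt (a : List Int) (n : Int) : Int :=
  let counts := (PySem.Dict.counter a).values
  let bests := (PySem.Set.ofList counts).map (fun v =>
    v * counts.foldl (fun s w => if w ≥ v then s + 1 else s) 0)
  match PySem.List.max? bests (fun x => x) with
  | some b => n - (a.length : Int) + b
  | none => 0  -- a = []: Python max() raises ValueError; excluded by Pre_solve

-- ===== PRECONDITION & SPEC =====
-- Pre_ excludes only a = [], on which A raises TypeError (range of float('-inf')) and B raises ValueError (max of empty).
def Pre_solve (a : List Int) (n : Int) : Prop := a ≠ []
instance (a : List Int) (n : Int) : Decidable (Pre_solve a n) := by unfold Pre_solve; infer_instance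
def pvWitness_solve : List Int × Int := ([1, 2, 2, 3, 3, 3], 6)

def Spec_solve (a : List Int) (n : Int) (out : Int) : Prop := out = solve_alt a n
instance (a : List Int) (n : Int) (out : Int) : Decidable (Spec_solve a n out) := by unfold Spec_solve; infer_instance

-- ===== CLAIM (what is proved, stated in full; the proofs are below) =====
def Claim_equal_solve : Prop := ∀ (a : List Int) (n : Int), Dom_solve a n → Pre_solve a n → Spec_solve a n (solve a n)

-- ===== LEMMAS AND PROOFS =====

-- the count-≥-threshold tally, shared shape of both programs
def pvG (vs : List Int) (m : Int) : Int := m * (vs.countP (fun w => decide (m ≤ w)) : Int)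

-- A's running max over keys, started at none (= -inf), once a first element is in
lemma pv_optfold_max (f : Int → Int) (l : List Int) (x : Int) :
    l.foldl (fun mx k =>
      match mx with
      | none => some (f k)
      | some m => some (max m (f k))) (some x)
      = some ((l.map f).foldl max x) := by
  induction l generalizing x with
  | nil => rfl
  | cons h t ih => simp [List.foldl_cons, ih]

-- A's running min over the m-loop, started at none (= inf)
lemma pv_optfold_min (f : Int → Int) (l : List Int) (x : Int) :
    l.foldl (fun mn m =>
      match mn with
      | none => some (f m)
      | some m' => some (min m' (f m))) (some x)
      = some ((l.map f).foldl min x) := by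
  induction l generalizing x with
  | nil => rfl
  | cons h t ih => simp [List.foldl_cons, ih]

-- min over (S - G m) is S - max over G m
lemma pv_foldl_min_sub (S : Int) (l : List Int) (g : Int → Int) (x : Int) :
    (l.map (fun m => S - g m)).foldl min (S - x) = S - (l.map g).foldl max x := by
  induction l generalizing x with
  | nil => rfl
  | cons h t ih =>
    simp only [List.map_cons, List.foldl_cons]
    rw [show min (S - x) (S - g h) = S - max x (g h) by omega, ih]

-- the removal sum: Σ φ(m, v) over vs equals Σ vs - m·#{v ∈ vs : m ≤ v}
lemma pv_removal_sum (m : Int) (vs : List Int) :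
    (vs.map (fun v => if m > v then v else if m < v then v - m else 0)).sum
      = vs.sum - pvG vs m := by
  induction vs with
  | nil => simp [pvG]
  | cons v t ih =>
    simp only [List.map_cons, List.sum_cons, pvG, List.countP_cons] at ih ⊢
    have h : (if m > v then v else if m < v then v - m else 0)
        = v - (if m ≤ v then m else 0) := by
      split_ifs <;> omega
    rw [h, ih]
    by_cases hc : m ≤ v
    · simp [hc]; ring_nf
    · simp [hc]; omega

-- membership in range(mx, 0, -1)
lemma pv_mem_range_neg1 (mx m : Int) : m ∈ PySem.List.pyRange mx 0 (-1) ↔ 1 ≤ m ∧ m ≤ mx := by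
  simp only [PySem.List.pyRange]
  norm_num
  constructor
  · rintro ⟨k, hk, rfl⟩
    split at hk
    · omega
    · simp at hk
  · intro ⟨h1, h2⟩
    refine ⟨(mx - m).toNat, ?_, ?_⟩
    · split <;> omega
    · omega

-- every value of Counter(a) is a positive count of a member of a
lemma pv_counts_eq (a : List Int) :
    (PySem.Dict.counter a).values = (PySem.Set.ofList a).map (fun k => ((a.count k : Nat) : Int)) := by
  rw [PySem.Dict.values_eq_map_keys _ (PySem.Dict.nodup_keys_counter a) 0, PySem.Dict.keys_counter]
  exact List.map_congr_left (fun k _ => PySem.Dict.getD_counter a k)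

lemma pv_counts_pos (a : List Int) (v : Int) (hv : v ∈ (PySem.Dict.counter a).values) : 1 ≤ v := by
  rw [pv_counts_eq] at hv
  obtain ⟨k, hk, rfl⟩ := List.mem_map.mp hv
  rw [PySem.Set.mem_ofList] at hk
  have := List.count_pos_iff.mpr hk
  omega

-- sum of the Counter values is len(a)
lemma pv_counts_sum (a : List Int) : (PySem.Dict.counter a).values.sum = (a.length : Int) := by
  rw [pv_counts_eq]
  have hperm : (PySem.Set.ofList a).Perm a.dedup := by
    rw [List.perm_ext_iff_of_nodup (PySem.Set.nodup_ofList a) a.nodup_dedup]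
    intro x; rw [PySem.Set.mem_ofList, List.mem_dedup]
  calc ((PySem.Set.ofList a).map (fun k => ((a.count k : Nat) : Int))).sum
      = (a.dedup.map (fun k => ((a.count k : Nat) : Int))).sum := (hperm.map _).sum_eq
    _ = (((a.dedup.map (fun k => a.count k)).sum : Nat) : Int) := by
        rw [Nat.cast_list_sum, List.map_map]; rfl
    _ = (a.length : Int) := by rw [List.sum_map_count_dedup_eq_length]


-- lookup of a key's count, to fold the goal's getD terms
def pvCnt (a : List Int) (k : Int) : Int := (PySem.Dict.counter a).getD k 0

lemma pvCnt_def (a : List Int) (k : Int) : (PySem.Dict.counter a).getD k 0 = pvCnt a k := rfl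

-- ===== VERDICT (by name: the statement is the Claim_ definition above) =====
theorem solve_spec : Claim_equal_solve := by
  intro a n _ ha
  unfold Pre_solve at ha
  have hnd := PySem.Dict.nodup_keys_counter a
  have hvals : (PySem.Dict.counter a).values
      = (PySem.Dict.counter a).keys.map (fun k => pvCnt a k) :=
    PySem.Dict.values_eq_map_keys _ hnd 0
  have hKne : (PySem.Dict.counter a).keys ≠ [] := by
    rw [PySem.Dict.keys_counter]
    cases a with
    | nil => exact absurd rfl ha
    | cons x t =>
      intro h
      have := (PySem.Set.mem_ofList (x :: t) x).mpr (List.mem_cons_self)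
      rw [h] at this; exact absurd this (List.not_mem_nil)
  obtain ⟨k0, K', hK⟩ := List.exists_cons_of_ne_nil hKne
  set V : List Int := (PySem.Dict.counter a).values with hV
  have hVcons : V = pvCnt a k0 :: K'.map (fun k => pvCnt a k) := by
    rw [hvals, hK, List.map_cons]
  have hmaxV : PySem.List.max? V (fun x => x)
      = some ((K'.map (fun k => pvCnt a k)).foldl max (pvCnt a k0)) := by
    rw [hVcons]; exact PySem.List.max?_id_cons _ _
  have hmxmem := PySem.List.max?_mem hmaxV
  have hmxmax := PySem.List.max?_isMax hmaxV
  have hVpos : ∀ v ∈ V, 1 ≤ v := fun v hv => pv_counts_pos a v (by rwa [hV] at hv)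
  have hmx1 : 1 ≤ (K'.map (fun k => pvCnt a k)).foldl max (pvCnt a k0) := hVpos _ hmxmem
  have hrem : ∀ m : Int,
      List.foldl (fun r k => if m > pvCnt a k then r + pvCnt a k
        else if m < pvCnt a k then r + (pvCnt a k - m) else r)
        0 (PySem.Dict.counter a).keys
      = (a.length : Int) - pvG V m := by
    intro m
    rw [hK]
    rw [PySem.List.foldl_congr_mem (k0 :: K') _
      (fun r k => r + (if m > pvCnt a k then pvCnt a k
        else if m < pvCnt a k then pvCnt a k - m else 0)) 0
      (by intro acc x _; simp only []; split_ifs <;> omega)]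
    rw [PySem.List.foldl_add]
    have hmap : (k0 :: K').map (fun k => if m > pvCnt a k then pvCnt a k
        else if m < pvCnt a k then pvCnt a k - m else 0)
        = V.map (fun v => if m > v then v else if m < v then v - m else 0) := by
      simp [hVcons, List.map_map]
    rw [hmap, pv_removal_sum]
    have hVsum : V.sum = (a.length : Int) := by rw [hV]; exact pv_counts_sum a
    omega
  unfold Spec_solve solve solve_alt
  simp only [pvCnt_def]
  simp only [← hV]
  simp only [hrem]
  rw [hK]
  simp only [List.foldl_cons]
  simp only [pv_optfold_max]
  have h1mem : (1:Int) ∈ PySem.List.pyRange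
      (List.foldl max (pvCnt a k0) (List.map (pvCnt a) K')) 0 (-1) :=
    (pv_mem_range_neg1 _ 1).mpr ⟨le_refl 1, hmx1⟩
  obtain ⟨m0, rt, hR⟩ : ∃ m0 rt, PySem.List.pyRange
      (List.foldl max (pvCnt a k0) (List.map (pvCnt a) K')) 0 (-1) = m0 :: rt := by
    cases h : PySem.List.pyRange (List.foldl max (pvCnt a k0) (List.map (pvCnt a) K')) 0 (-1) with
    | nil => rw [h] at h1mem; exact absurd h1mem (List.not_mem_nil)
    | cons x t => exact ⟨x, t, rfl⟩
  simp only [hR, List.foldl_cons]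
  simp only [pv_optfold_min]
  simp only [pv_foldl_min_sub]
  have hbests : List.map (fun v => v * List.foldl (fun s w => if w ≥ v then s + 1 else s) 0 V)
        (PySem.Set.ofList V)
      = List.map (fun v => pvG V v) (PySem.Set.ofList V) := by
    apply List.map_congr_left; intro v _
    rw [PySem.List.foldl_ite_add_one (fun w => w ≥ v) V 0]
    simp [pvG, ge_iff_le]
  rw [hbests]
  have hMAeq : PySem.List.max? (pvG V m0 :: List.map (pvG V) rt) (fun x => x)
      = some (List.foldl max (pvG V m0) (List.map (pvG V) rt)) :=
    PySem.List.max?_id_cons _ _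
  have hMAmem : List.foldl max (pvG V m0) (List.map (pvG V) rt)
      ∈ List.map (fun m => pvG V m) (m0 :: rt) := PySem.List.max?_mem hMAeq
  have hMAmax : ∀ y ∈ List.map (fun m => pvG V m) (m0 :: rt),
      y ≤ List.foldl max (pvG V m0) (List.map (pvG V) rt) := by
    intro y hy
    exact PySem.List.max?_isMax hMAeq y hy
  cases hmax : PySem.List.max? (List.map (fun v => pvG V v) (PySem.Set.ofList V)) (fun x => x) with
  | none =>
    rw [PySem.List.max?_eq_none_iff, List.map_eq_nil_iff] at hmax
    have hmem := (PySem.Set.mem_ofList V _).mpr hmxmem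
    rw [hmax] at hmem
    exact absurd hmem (List.not_mem_nil)
  | some b =>
    have hbmem := PySem.List.max?_mem hmax
    have hbmax := PySem.List.max?_isMax hmax
    have hG_le_b : ∀ m : Int, 1 ≤ m →
        m ≤ List.foldl max (pvCnt a k0) (List.map (fun k => pvCnt a k) K') → pvG V m ≤ b := by
      intro m h1 h2
      have hfmem : List.foldl max (pvCnt a k0) (List.map (fun k => pvCnt a k) K')
          ∈ V.filter (fun w => decide (m ≤ w)) :=
        List.mem_filter.mpr ⟨hmxmem, by simpa using h2⟩
      cases hmin : PySem.List.min? (V.filter (fun w => decide (m ≤ w))) (fun x => x) with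
      | none =>
        rw [PySem.List.min?_eq_none_iff] at hmin
        rw [hmin] at hfmem
        exact absurd hfmem (List.not_mem_nil)
      | some w0 =>
        have hw0mem := PySem.List.min?_mem hmin
        have hw0min := PySem.List.min?_isMin hmin
        obtain ⟨hw0V, hmw0'⟩ := List.mem_filter.mp hw0mem
        have hmw0 : m ≤ w0 := by simpa using hmw0'
        have hcnt_eq : V.countP (fun w => decide (w0 ≤ w)) = V.countP (fun w => decide (m ≤ w)) := by
          apply List.countP_congr
          intro x hx
          simp only [decide_eq_true_eq]
          constructor
          · intro h; omega
          · intro h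
            have := hw0min x (List.mem_filter.mpr ⟨hx, by simpa using h⟩)
            simpa using this
        have hGle : pvG V m ≤ pvG V w0 := by
          unfold pvG
          rw [hcnt_eq]
          exact mul_le_mul_of_nonneg_right hmw0 (by positivity)
        have hw0b : pvG V w0 ≤ b := by
          have hmem : pvG V w0 ∈ List.map (fun v => pvG V v) (PySem.Set.ofList V) :=
            List.mem_map.mpr ⟨w0, (PySem.Set.mem_ofList V w0).mpr hw0V, rfl⟩
          simpa using hbmax _ hmem
        omega
    have hMAleb : List.foldl max (pvG V m0) (List.map (pvG V) rt) ≤ b := by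
      obtain ⟨m, hmR, hMAm⟩ := List.mem_map.mp hMAmem
      have hm := (pv_mem_range_neg1 _ m).mp (by rw [hR]; exact hmR)
      rw [← hMAm]
      exact hG_le_b m hm.1 hm.2
    have hbleMA : b ≤ List.foldl max (pvG V m0) (List.map (pvG V) rt) := by
      obtain ⟨v, hvS, hvb⟩ := List.mem_map.mp hbmem
      have hvV := (PySem.Set.mem_ofList V v).mp hvS
      have hvR : v ∈ m0 :: rt := by
        rw [← hR]
        exact (pv_mem_range_neg1 _ v).mpr ⟨hVpos v hvV, hmxmax v hvV⟩
      have hmem : pvG V v ∈ List.map (fun m => pvG V m) (m0 :: rt) :=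
        List.mem_map.mpr ⟨v, hvR, rfl⟩
      have := hMAmax _ hmem
      rw [hvb] at this
      exact this
    rw [le_antisymm hMAleb hbleMA]
    ring
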